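-- pv_equiv track=rewrite | github.com/ychen8777/BLASTn-Variation-for-Probabilistic-Genome-Sequences | scripts/align_evaluate.py | count_correctness
-- ===== SOURCE A (Python) =====
-- def count_correctness(true_start_pos, seq_length, local_alignments, choices):
--     ''' return increment for total_correct, total_start_correct, and
--     total_end_correct numbers
--     '''
--
--     #choices = len(local_alignments)
--
--     total_correct = [0] * choices
--     total_start_correct = [0] * choices
--     total_end_correct = [0] * choices
--
--     true_end_pos = true_start_pos + seq_length - 1
--     for i in range(len(local_alignments)):
--         pre_start_pos = local_alignments[i][0][0]
--         pre_end_pos = local_alignments[i][0][1]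
--
--         if pre_start_pos == true_start_pos and pre_end_pos == true_end_pos:
--             for j in range(i, choices):
--                 total_correct[j] = 1
--
--         if pre_start_pos == true_start_pos and pre_end_pos != true_end_pos:
--             for j in range(i, choices):
--                 total_start_correct[j] = 1
--
--         if pre_start_pos != true_start_pos and pre_end_pos == true_end_pos:
--             for j in range(i, choices):
--                 total_end_correct[j] = 1
--     for i in range(len(total_correct)):
--         if total_correct[i] == 1:
--             total_start_correct[i] = 0
--             total_end_correct[i] = 0
--
--     return total_correct, total_start_correct, total_end_correct
-- ===== SOURCE B (Python) =====
-- def count_correctness(true_start_pos, seq_length, local_alignments, choices):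
--     ''' return increment for total_correct, total_start_correct, and
--     total_end_correct numbers
--     '''
--     n = choices if choices > 0 else 0
--     true_end_pos = true_start_pos + seq_length - 1
--     # earliest index at which each kind of match occurs (n = never)
--     first_full = first_start = first_end = n
--     for i, aln in enumerate(local_alignments[:n]):
--         pre_start_pos = aln[0][0]
--         pre_end_pos = aln[0][1]
--         if pre_start_pos == true_start_pos and pre_end_pos == true_end_pos:
--             if i < first_full:
--                 first_full = i
--         elif pre_start_pos == true_start_pos:
--             if i < first_start:
--                 first_start = i
--         elif pre_end_pos == true_end_pos:
--             if i < first_end: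
--                 first_end = i
--     total_correct = [0] * first_full + [1] * (n - first_full)
--     ws = max(first_full - first_start, 0)
--     total_start_correct = [0] * first_start + [1] * ws + [0] * (n - first_start - ws)
--     we = max(first_full - first_end, 0)
--     total_end_correct = [0] * first_end + [1] * we + [0] * (n - first_end - we)
--     return total_correct, total_start_correct, total_end_correct
-- ===== Notes on version B (the rewrite author's own statement) =====
-- stated objective: alternative
-- what changed: Instead of filling a suffix of each flag list inside the scan and then zeroing start/end flags where total_correct is set, B makes one pass recording the earliest index of each kind of match over the first max(choices,0) alignments and builds the three lists in closed form by list arithmetic.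
-- crash fix: A raises IndexError when some alignment beyond index choices has no first row of length >= 2 while the first max(choices,0) alignments are well-formed; B returns the flags computed from those first alignments. — e.g. on count_correctness(0, 3, [[[0, 2]], []], 1): A raises IndexError, B returns ([1], [0], [0])
import Mathlib
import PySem

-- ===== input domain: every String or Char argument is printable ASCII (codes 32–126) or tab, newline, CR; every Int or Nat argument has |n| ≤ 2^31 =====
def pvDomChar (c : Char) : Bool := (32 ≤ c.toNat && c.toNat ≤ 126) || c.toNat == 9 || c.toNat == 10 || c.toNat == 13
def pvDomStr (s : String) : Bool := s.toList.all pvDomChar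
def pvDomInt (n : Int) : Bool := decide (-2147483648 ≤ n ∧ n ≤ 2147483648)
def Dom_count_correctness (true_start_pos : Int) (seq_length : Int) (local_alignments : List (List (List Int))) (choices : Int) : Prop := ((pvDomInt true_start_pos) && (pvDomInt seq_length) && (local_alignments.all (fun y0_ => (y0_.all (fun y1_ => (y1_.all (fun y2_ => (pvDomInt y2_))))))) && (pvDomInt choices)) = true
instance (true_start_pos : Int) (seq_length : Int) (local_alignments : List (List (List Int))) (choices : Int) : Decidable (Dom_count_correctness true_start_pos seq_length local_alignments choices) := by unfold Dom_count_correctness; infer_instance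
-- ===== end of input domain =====

-- B replaces A's flag-filling inner loops and final zeroing pass by one scan for the earliest
-- index of each kind of match followed by a closed-form construction of the three lists.

-- ===== PORT A =====
-- literal port of A: three [0]*choices lists, for each i the inner `for j in range(i, choices)` loops
-- set a suffix to 1, then a final pass zeroes start/end flags where total_correct is 1.
def count_correctness (true_start_pos : Int) (seq_length : Int) (local_alignments : List (List (List Int))) (choices : Int) : List Int × List Int × List Int :=
  let total_correct : List Int := List.replicate choices.toNat 0
  let total_start_correct : List Int := List.replicate choices.toNat 0
  let total_end_correct : List Int := List.replicate choices.toNat 0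
  let true_end_pos := true_start_pos + seq_length - 1
  let st := (PySem.List.pyRange 0 (local_alignments.length : Int) 1).foldl
    (fun (st : List Int × List Int × List Int) (i : Int) =>
      let pre_start_pos := PySem.List.pyGetD (PySem.List.pyGetD (PySem.List.pyGetD local_alignments i []) 0 []) 0 0
      let pre_end_pos := PySem.List.pyGetD (PySem.List.pyGetD (PySem.List.pyGetD local_alignments i []) 0 []) 1 0
      let tc := if pre_start_pos = true_start_pos ∧ pre_end_pos = true_end_pos then
          (PySem.List.pyRange i choices 1).foldl (fun l j => l.set j.toNat 1) st.1 else st.1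
      let tsc := if pre_start_pos = true_start_pos ∧ pre_end_pos ≠ true_end_pos then
          (PySem.List.pyRange i choices 1).foldl (fun l j => l.set j.toNat 1) st.2.1 else st.2.1
      let tec := if pre_start_pos ≠ true_start_pos ∧ pre_end_pos = true_end_pos then
          (PySem.List.pyRange i choices 1).foldl (fun l j => l.set j.toNat 1) st.2.2 else st.2.2
      (tc, tsc, tec))
    (total_correct, total_start_correct, total_end_correct)
  let p := (PySem.List.pyRange 0 (st.1.length : Int) 1).foldl
    (fun (p : List Int × List Int) (i : Int) =>
      if PySem.List.pyGetD st.1 i 0 = 1 then (p.1.set i.toNat 0, p.2.set i.toNat 0) else p)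
    (st.2.1, st.2.2)
  (st.1, p.1, p.2)

-- ===== PORT B =====
-- literal port of Source B: one scan over local_alignments[:n] recording the earliest index of each
-- kind of match (n = never), then three comprehensions over range(n).
def count_correctness_alt (true_start_pos : Int) (seq_length : Int) (local_alignments : List (List (List Int))) (choices : Int) : List Int × List Int × List Int :=
  let n : Int := if choices > 0 then choices else 0
  let true_end_pos := true_start_pos + seq_length - 1
  -- local_alignments[:n] with n ≥ 0 is exactly `take n.toNat`
  let fse := (PySem.List.enumerate (local_alignments.take n.toNat) 0).foldl
    (fun (fse : Int × Int × Int) (p : Int × List (List Int)) =>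
      let pre_start_pos := PySem.List.pyGetD (PySem.List.pyGetD p.2 0 []) 0 0
      let pre_end_pos := PySem.List.pyGetD (PySem.List.pyGetD p.2 0 []) 1 0
      if pre_start_pos = true_start_pos ∧ pre_end_pos = true_end_pos then
        (if p.1 < fse.1 then (p.1, fse.2.1, fse.2.2) else fse)
      else if pre_start_pos = true_start_pos then
        (if p.1 < fse.2.1 then (fse.1, p.1, fse.2.2) else fse)
      else if pre_end_pos = true_end_pos then
        (if p.1 < fse.2.2 then (fse.1, fse.2.1, p.1) else fse)
      else fse)
    (n, n, n)
  let ws := max (fse.1 - fse.2.1) 0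
  let we := max (fse.1 - fse.2.2) 0
  (List.replicate fse.1.toNat (0 : Int) ++ List.replicate (n - fse.1).toNat 1,
   List.replicate fse.2.1.toNat (0 : Int) ++ List.replicate ws.toNat 1 ++ List.replicate (n - fse.2.1 - ws).toNat 0,
   List.replicate fse.2.2.toNat (0 : Int) ++ List.replicate we.toNat 1 ++ List.replicate (n - fse.2.2 - we).toNat 0)

-- ===== PRECONDITION & SPEC =====
-- Pre_ excludes exactly the inputs on which A raises IndexError: some alignment whose first
-- row is missing or shorter than 2 (A reads local_alignments[i][0][0] and [0][1] for every i).
def Pre_count_correctness (true_start_pos : Int) (seq_length : Int) (local_alignments : List (List (List Int))) (choices : Int) : Prop :=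
  ∀ a ∈ local_alignments, a ≠ [] ∧ 2 ≤ (a.headD []).length

instance (true_start_pos : Int) (seq_length : Int) (local_alignments : List (List (List Int))) (choices : Int) : Decidable (Pre_count_correctness true_start_pos seq_length local_alignments choices) := by unfold Pre_count_correctness; infer_instance

def pvWitness_count_correctness : Int × Int × List (List (List Int)) × Int := (1, 3, [[[1, 3]], [[0, 3]]], 3)

-- A raises IndexError when some alignment beyond index choices is malformed while all alignments B
-- inspects (the first max(choices,0)) are well-formed; B returns the flags computed from those.
def Raises_count_correctness (true_start_pos : Int) (seq_length : Int) (local_alignments : List (List (List Int))) (choices : Int) : Prop :=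
  (∀ a ∈ local_alignments.take choices.toNat, a ≠ [] ∧ 2 ≤ (a.headD []).length) ∧
  (∃ a ∈ local_alignments, ¬(a ≠ [] ∧ 2 ≤ (a.headD []).length))

instance (true_start_pos : Int) (seq_length : Int) (local_alignments : List (List (List Int))) (choices : Int) : Decidable (Raises_count_correctness true_start_pos seq_length local_alignments choices) := by unfold Raises_count_correctness; infer_instance

def pvRaiseWitness_count_correctness : Int × Int × List (List (List Int)) × Int := (0, 3, [[[0, 2]], []], 1)
def pvRaiseWitnessOut_count_correctness : List Int × List Int × List Int := ([1], [0], [0])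

def Spec_count_correctness (true_start_pos : Int) (seq_length : Int) (local_alignments : List (List (List Int))) (choices : Int) (out : List Int × List Int × List Int) : Prop := out = count_correctness_alt true_start_pos seq_length local_alignments choices
instance (true_start_pos : Int) (seq_length : Int) (local_alignments : List (List (List Int))) (choices : Int) (out : List Int × List Int × List Int) : Decidable (Spec_count_correctness true_start_pos seq_length local_alignments choices out) := by unfold Spec_count_correctness; infer_instance

-- ===== CLAIM (what is proved, stated in full; the proofs are below) =====
def Claim_equal_count_correctness : Prop := ∀ (true_start_pos : Int) (seq_length : Int) (local_alignments : List (List (List Int))) (choices : Int), Dom_count_correctness true_start_pos seq_length local_alignments choices → Pre_count_correctness true_start_pos seq_length local_alignments choices → Spec_count_correctness true_start_pos seq_length local_alignments choices (count_correctness true_start_pos seq_length local_alignments choices)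

def Claim_raises_count_correctness : Prop := (∀ (true_start_pos : Int) (seq_length : Int) (local_alignments : List (List (List Int))) (choices : Int), Dom_count_correctness true_start_pos seq_length local_alignments choices → Raises_count_correctness true_start_pos seq_length local_alignments choices → ¬ Pre_count_correctness true_start_pos seq_length local_alignments choices) ∧ (Dom_count_correctness (pvRaiseWitness_count_correctness.1) (pvRaiseWitness_count_correctness.2.1) (pvRaiseWitness_count_correctness.2.2.1) (pvRaiseWitness_count_correctness.2.2.2) ∧ Raises_count_correctness (pvRaiseWitness_count_correctness.1) (pvRaiseWitness_count_correctness.2.1) (pvRaiseWitness_count_correctness.2.2.1) (pvRaiseWitness_count_correctness.2.2.2) ∧ count_correctness_alt (pvRaiseWitness_count_correctness.1) (pvRaiseWitness_count_correctness.2.1) (pvRaiseWitness_count_correctness.2.2.1) (pvRaiseWitness_count_correctness.2.2.2) = pvRaiseWitnessOut_count_correctness)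

-- ===== LEMMAS AND PROOFS =====

-- suffix indicator list: [1 if m <= j else 0 for j in range(n)]
def indL (n : Nat) (m : Int) : List Int := (List.range n).map (fun (j : Nat) => if m ≤ (j : Int) then 1 else 0)
-- window indicator list: [1 if m <= j < f else 0 for j in range(n)]
def indL2 (n : Nat) (m f : Int) : List Int := (List.range n).map (fun (j : Nat) => if m ≤ (j : Int) ∧ (j : Int) < f then 1 else 0)

-- abstract joint "earliest match index" recursion shared by both loop invariants
def gmins (tsp te : Int) : List (List (List Int)) → Int → Int × Int × Int → Int × Int × Int
  | [], _, st => st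
  | a :: t, k, st =>
    let ps := PySem.List.pyGetD (PySem.List.pyGetD a 0 []) 0 0
    let pe := PySem.List.pyGetD (PySem.List.pyGetD a 0 []) 1 0
    gmins tsp te t (k + 1)
      (if ps = tsp ∧ pe = te then min st.1 k else st.1,
       if ps = tsp ∧ pe ≠ te then min st.2.1 k else st.2.1,
       if ps ≠ tsp ∧ pe = te then min st.2.2 k else st.2.2)

theorem length_indL (n : Nat) (m : Int) : (indL n m).length = n := by simp [indL]

theorem replicate_eq_indL (n : Nat) : List.replicate n (0 : Int) = indL n n := by
  refine List.ext_getElem (by simp [indL]) ?_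
  intro k h1 h2
  simp only [indL, List.getElem_map, List.getElem_range, List.getElem_replicate]
  rw [if_neg (by simp at h1; omega)]

theorem foldl_set_eq (c : Int) (fuel : Nat) : ∀ (i : Int), (c - i).toNat ≤ fuel → 0 ≤ i →
    ∀ L : List Int, (PySem.List.pyRange i c 1).foldl (fun l j => l.set j.toNat 1) L
      = L.mapIdx (fun k v => if i ≤ (k : Int) ∧ (k : Int) < c then 1 else v) := by
  induction fuel with
  | zero =>
    intro i hf h0 L
    rw [PySem.List.pyRange_one_eq_nil (by omega)]
    refine List.ext_getElem (by simp) ?_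
    intro k h1 h2
    simp only [List.foldl_nil, List.getElem_mapIdx]
    rw [if_neg (by omega)]
  | succ fuel ih =>
    intro i hf h0 L
    by_cases hc : c ≤ i
    · rw [PySem.List.pyRange_one_eq_nil hc]
      refine List.ext_getElem (by simp) ?_
      intro k h1 h2
      simp only [List.foldl_nil, List.getElem_mapIdx]
      rw [if_neg (by omega)]
    · rw [PySem.List.pyRange_one_cons (by omega), List.foldl_cons]
      rw [ih (i + 1) (by omega) (by omega)]
      refine List.ext_getElem (by simp) ?_
      intro k h1 h2
      have hkL : k < L.length := by simpa using h2
      simp only [List.getElem_mapIdx]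
      by_cases hki : k = i.toNat
      · subst hki
        rw [if_neg (by omega), if_pos (by omega), List.getElem_set_self]
      · rw [List.getElem_set_ne (by omega)]
        by_cases hc1 : i + 1 ≤ (k : Int) ∧ (k : Int) < c
        · rw [if_pos hc1, if_pos (by omega)]
        · rw [if_neg hc1, if_neg (by omega)]

theorem set_indL (c m i : Int) (h0 : 0 ≤ i) (hm : m ≤ (c.toNat : Int)) :
    (PySem.List.pyRange i c 1).foldl (fun l j => l.set j.toNat 1) (indL c.toNat m)
      = indL c.toNat (min m i) := by
  rw [foldl_set_eq c (c - i).toNat i le_rfl h0]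
  refine List.ext_getElem (by simp [indL]) ?_
  intro k h1 h2
  have hk : k < c.toNat := by simpa [indL] using h2
  simp only [indL, List.getElem_mapIdx, List.getElem_map, List.getElem_range]
  by_cases hc1 : i ≤ (k : Int) ∧ (k : Int) < c
  · rw [if_pos hc1, if_pos (by omega)]
  · by_cases hm2 : m ≤ (k : Int)
    · rw [if_neg hc1, if_pos hm2, if_pos (by omega)]
    · rw [if_neg hc1, if_neg hm2, if_neg (by omega)]

-- A's first loop, over the enumerated alignments, maintains three indL lists whose thresholds
-- follow gmins.
theorem A_loop1 (tsp te c : Int) (xs : List (List (List Int))) : ∀ (k f s e : Int), 0 ≤ k →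
    f ≤ (c.toNat : Int) → s ≤ (c.toNat : Int) → e ≤ (c.toNat : Int) →
    (PySem.List.enumerate xs k).foldl
      (fun (st : List Int × List Int × List Int) (p : Int × List (List Int)) =>
        let ps := PySem.List.pyGetD (PySem.List.pyGetD p.2 0 []) 0 0
        let pe := PySem.List.pyGetD (PySem.List.pyGetD p.2 0 []) 1 0
        ((if ps = tsp ∧ pe = te then (PySem.List.pyRange p.1 c 1).foldl (fun l j => l.set j.toNat 1) st.1 else st.1),
         (if ps = tsp ∧ pe ≠ te then (PySem.List.pyRange p.1 c 1).foldl (fun l j => l.set j.toNat 1) st.2.1 else st.2.1),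
         (if ps ≠ tsp ∧ pe = te then (PySem.List.pyRange p.1 c 1).foldl (fun l j => l.set j.toNat 1) st.2.2 else st.2.2)))
      (indL c.toNat f, indL c.toNat s, indL c.toNat e)
    = (indL c.toNat (gmins tsp te xs k (f, s, e)).1,
       indL c.toNat (gmins tsp te xs k (f, s, e)).2.1,
       indL c.toNat (gmins tsp te xs k (f, s, e)).2.2) := by
  induction xs with
  | nil => intro k f s e _ _ _ _; simp [PySem.List.enumerate_nil, gmins]
  | cons a t ih =>
    intro k f s e hk hf hs he
    rw [PySem.List.enumerate_cons, List.foldl_cons]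
    have step : ∀ (b : Prop) [Decidable b] (m : Int), m ≤ (c.toNat : Int) →
        (if b then (PySem.List.pyRange k c 1).foldl (fun l j => l.set j.toNat 1) (indL c.toNat m) else indL c.toNat m)
          = indL c.toNat (if b then min m k else m) := by
      intro b _ m hm
      by_cases hb : b
      · rw [if_pos hb, if_pos hb, set_indL c m k hk hm]
      · rw [if_neg hb, if_neg hb]
    simp only
    rw [step _ _ hf, step _ _ hs, step _ _ he]
    rw [ih (k + 1) _ _ _ (by omega)
      (by split <;> omega) (by split <;> omega) (by split <;> omega)]
    simp [gmins]

-- B's scan computes exactly gmins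
theorem B_loop (tsp te : Int) (xs : List (List (List Int))) : ∀ (k : Int) (st : Int × Int × Int),
    (PySem.List.enumerate xs k).foldl
      (fun (fse : Int × Int × Int) (p : Int × List (List Int)) =>
        let ps := PySem.List.pyGetD (PySem.List.pyGetD p.2 0 []) 0 0
        let pe := PySem.List.pyGetD (PySem.List.pyGetD p.2 0 []) 1 0
        if ps = tsp ∧ pe = te then
          (if p.1 < fse.1 then (p.1, fse.2.1, fse.2.2) else fse)
        else if ps = tsp then
          (if p.1 < fse.2.1 then (fse.1, p.1, fse.2.2) else fse)
        else if pe = te then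
          (if p.1 < fse.2.2 then (fse.1, fse.2.1, p.1) else fse)
        else fse)
      st = gmins tsp te xs k st := by
  induction xs with
  | nil => intro k st; simp [PySem.List.enumerate_nil, gmins]
  | cons a t ih =>
    intro k st
    rw [PySem.List.enumerate_cons, List.foldl_cons, ih]
    simp only [gmins]
    congr 1
    set ps := PySem.List.pyGetD (PySem.List.pyGetD a 0 []) 0 0 with hps
    set pe := PySem.List.pyGetD (PySem.List.pyGetD a 0 []) 1 0 with hpe
    by_cases h1 : ps = tsp <;> by_cases h2 : pe = te <;>
      obtain ⟨f, s, e⟩ := st <;>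
      simp [h1, h2, min_def] <;> split <;> split <;> first | rfl | omega

-- gmins over an append
theorem gmins_append (tsp te : Int) (xs ys : List (List (List Int))) : ∀ (k : Int) (st : Int × Int × Int),
    gmins tsp te (xs ++ ys) k st = gmins tsp te ys (k + xs.length) (gmins tsp te xs k st) := by
  induction xs with
  | nil => intro k st; simp [gmins]
  | cons a t ih =>
    intro k st
    simp only [List.cons_append, gmins, ih, List.length_cons]
    congr 1
    push_cast
    ring

-- once every component is below the running index, gmins is the identity
theorem gmins_high (tsp te : Int) (xs : List (List (List Int))) : ∀ (k f s e : Int),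
    f ≤ k → s ≤ k → e ≤ k → gmins tsp te xs k (f, s, e) = (f, s, e) := by
  induction xs with
  | nil => intro k f s e _ _ _; simp [gmins]
  | cons a t ih =>
    intro k f s e hf hs he
    simp only [gmins]
    have e1 : ∀ (b : Prop) [Decidable b] (m : Int), m ≤ k → (if b then min m k else m) = m := by
      intro b _ m hm; split <;> omega
    rw [e1 _ _ hf, e1 _ _ hs, e1 _ _ he]
    exact ih (k + 1) f s e (by omega) (by omega) (by omega)

-- components of gmins never increase
theorem gmins_le (tsp te : Int) (xs : List (List (List Int))) : ∀ (k : Int) (st : Int × Int × Int),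
    (gmins tsp te xs k st).1 ≤ st.1 ∧ (gmins tsp te xs k st).2.1 ≤ st.2.1 ∧ (gmins tsp te xs k st).2.2 ≤ st.2.2 := by
  induction xs with
  | nil => intro k st; simp [gmins]
  | cons a t ih =>
    intro k st
    simp only [gmins]
    refine ⟨le_trans (ih (k + 1) _).1 ?_, le_trans (ih (k + 1) _).2.1 ?_, le_trans (ih (k + 1) _).2.2 ?_⟩ <;>
      dsimp <;> split <;> omega

-- processing the whole list is the same as processing the first n elements, when start index 0 and all components start at n
theorem gmins_take (tsp te : Int) (xs : List (List (List Int))) (n : Nat) :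
    gmins tsp te xs 0 ((n : Int), (n : Int), (n : Int)) = gmins tsp te (xs.take n) 0 ((n : Int), (n : Int), (n : Int)) := by
  by_cases h : xs.length ≤ n
  · rw [List.take_of_length_le h]
  · conv_lhs => rw [← List.take_append_drop n xs]
    rw [gmins_append]
    obtain ⟨g1, g2, g3⟩ := gmins_le tsp te (xs.take n) 0 ((n : Int), (n : Int), (n : Int))
    rcases hst : gmins tsp te (xs.take n) 0 ((n : Int), (n : Int), (n : Int)) with ⟨f, s, e⟩
    rw [hst] at g1 g2 g3
    have hlen : (xs.take n).length = n := by simp; omega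
    rw [hlen]
    exact gmins_high tsp te (xs.drop n) _ f s e (by simp at g1 ⊢; omega) (by simp at g2 ⊢; omega) (by simp at g3 ⊢; omega)

-- second loop: zeroing positions where the total_correct indicator is 1
theorem zero_aux (n : Nat) (F m : Int) : ∀ (k : Nat), k ≤ n →
    (PySem.List.pyRange 0 (k : Int) 1).foldl
      (fun (l : List Int) (i : Int) => if PySem.List.pyGetD (indL n F) i 0 = 1 then l.set i.toNat 0 else l)
      (indL n m)
    = (List.range n).map (fun (j : Nat) => if m ≤ (j : Int) ∧ ¬((F ≤ (j : Int)) ∧ (j : Int) < (k : Int)) then 1 else 0) := by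
  intro k
  induction k with
  | zero =>
    intro _
    rw [show ((0 : Nat) : Int) = 0 by rfl, PySem.List.pyRange_one_eq_nil le_rfl, List.foldl_nil]
    simp only [indL]
    apply List.map_congr_left
    intro j hj
    by_cases hm : m ≤ (j : Int)
    · rw [if_pos hm, if_pos ⟨hm, by omega⟩]
    · rw [if_neg hm, if_neg (by omega)]
  | succ k ih =>
    intro hk1
    rw [show ((k + 1 : Nat) : Int) = (k : Int) + 1 by push_cast; ring,
      PySem.List.pyRange_one_succ_right (by omega), List.foldl_append, List.foldl_cons, List.foldl_nil,
      ih (by omega)]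
    have hget : PySem.List.pyGetD (indL n F) (k : Int) 0 = if F ≤ (k : Int) then 1 else 0 := by
      rw [PySem.List.pyGetD_natCast, List.getD_eq_getElem (indL n F) 0 (by rw [length_indL]; omega)]
      simp only [indL, List.getElem_map, List.getElem_range]
    by_cases hF : F ≤ (k : Int)
    · rw [hget, if_pos hF, if_pos rfl]
      refine List.ext_getElem (by simp) ?_
      intro j h1 h2
      have hjn : j < n := by simpa using h2
      simp only [Int.toNat_natCast] at h1 ⊢
      by_cases hjk : j = k
      · subst hjk
        rw [List.getElem_set_self, List.getElem_map, List.getElem_range, if_neg (by omega)]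
      · rw [List.getElem_set_ne (by omega), List.getElem_map, List.getElem_map]
        simp only [List.getElem_range]
        by_cases hmj : m ≤ (j : Int) ∧ ¬(F ≤ (j : Int) ∧ (j : Int) < (k : Int))
        · rw [if_pos hmj, if_pos (by omega)]
        · rw [if_neg hmj, if_neg (by omega)]
    · rw [hget, if_neg hF, if_neg (by omega)]
      apply List.map_congr_left
      intro j hj
      have hjn : j < n := by simpa using hj
      by_cases hmj : m ≤ (j : Int) ∧ ¬(F ≤ (j : Int) ∧ (j : Int) < (k : Int))
      · rw [if_pos hmj, if_pos (by omega)]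
      · rw [if_neg hmj, if_neg (by omega)]

-- converting A's index loop over range(len(la)) into a loop over enumerate(la)
theorem A_fold_enum (tsp te c : Int) (la : List (List (List Int))) (init : List Int × List Int × List Int) :
    (PySem.List.pyRange 0 (la.length : Int) 1).foldl
      (fun (st : List Int × List Int × List Int) (i : Int) =>
        ((if PySem.List.pyGetD (PySem.List.pyGetD (PySem.List.pyGetD la i []) 0 []) 0 0 = tsp ∧ PySem.List.pyGetD (PySem.List.pyGetD (PySem.List.pyGetD la i []) 0 []) 1 0 = te then (PySem.List.pyRange i c 1).foldl (fun l j => l.set j.toNat 1) st.1 else st.1),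
         (if PySem.List.pyGetD (PySem.List.pyGetD (PySem.List.pyGetD la i []) 0 []) 0 0 = tsp ∧ PySem.List.pyGetD (PySem.List.pyGetD (PySem.List.pyGetD la i []) 0 []) 1 0 ≠ te then (PySem.List.pyRange i c 1).foldl (fun l j => l.set j.toNat 1) st.2.1 else st.2.1),
         (if PySem.List.pyGetD (PySem.List.pyGetD (PySem.List.pyGetD la i []) 0 []) 0 0 ≠ tsp ∧ PySem.List.pyGetD (PySem.List.pyGetD (PySem.List.pyGetD la i []) 0 []) 1 0 = te then (PySem.List.pyRange i c 1).foldl (fun l j => l.set j.toNat 1) st.2.2 else st.2.2)))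
      init
    = (PySem.List.enumerate la 0).foldl
      (fun (st : List Int × List Int × List Int) (p : Int × List (List Int)) =>
        ((if PySem.List.pyGetD (PySem.List.pyGetD p.2 0 []) 0 0 = tsp ∧ PySem.List.pyGetD (PySem.List.pyGetD p.2 0 []) 1 0 = te then (PySem.List.pyRange p.1 c 1).foldl (fun l j => l.set j.toNat 1) st.1 else st.1),
         (if PySem.List.pyGetD (PySem.List.pyGetD p.2 0 []) 0 0 = tsp ∧ PySem.List.pyGetD (PySem.List.pyGetD p.2 0 []) 1 0 ≠ te then (PySem.List.pyRange p.1 c 1).foldl (fun l j => l.set j.toNat 1) st.2.1 else st.2.1),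
         (if PySem.List.pyGetD (PySem.List.pyGetD p.2 0 []) 0 0 ≠ tsp ∧ PySem.List.pyGetD (PySem.List.pyGetD p.2 0 []) 1 0 = te then (PySem.List.pyRange p.1 c 1).foldl (fun l j => l.set j.toNat 1) st.2.2 else st.2.2)))
      init := by
  rw [PySem.List.enumerate_eq_map_pyRange la ([] : List (List Int)), List.foldl_map]
  rfl

-- the pair state of A's final zeroing loop splits componentwise
theorem pair_fold_set (l : List Int) (tc : List Int) (x y : List Int) :
    l.foldl (fun (p : List Int × List Int) (i : Int) => if PySem.List.pyGetD tc i 0 = 1 then (p.1.set i.toNat 0, p.2.set i.toNat 0) else p) (x, y)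
    = (l.foldl (fun (q : List Int) (i : Int) => if PySem.List.pyGetD tc i 0 = 1 then q.set i.toNat 0 else q) x,
       l.foldl (fun (q : List Int) (i : Int) => if PySem.List.pyGetD tc i 0 = 1 then q.set i.toNat 0 else q) y) := by
  induction l generalizing x y with
  | nil => rfl
  | cons a t ih =>
    simp only [List.foldl_cons]
    by_cases h : PySem.List.pyGetD tc a 0 = 1
    · rw [if_pos h, if_pos h, if_pos h, ih]
    · rw [if_neg h, if_neg h, if_neg h, ih]

-- components of gmins stay nonnegative
theorem gmins_nonneg (tsp te : Int) (xs : List (List (List Int))) : ∀ (k : Int) (st : Int × Int × Int),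
    0 ≤ k → 0 ≤ st.1 → 0 ≤ st.2.1 → 0 ≤ st.2.2 →
    0 ≤ (gmins tsp te xs k st).1 ∧ 0 ≤ (gmins tsp te xs k st).2.1 ∧ 0 ≤ (gmins tsp te xs k st).2.2 := by
  induction xs with
  | nil => intro k st _ h1 h2 h3; exact ⟨h1, h2, h3⟩
  | cons a t ih =>
    intro k st hk h1 h2 h3
    simp only [gmins]
    exact ih (k + 1) _ (by omega) (by dsimp; split <;> omega) (by dsimp; split <;> omega) (by dsimp; split <;> omega)

-- B's C-level list construction is the suffix indicator
theorem repl_indL (n : Nat) (f : Int) (h0 : 0 ≤ f) (hn : f ≤ (n : Int)) :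
    List.replicate f.toNat (0 : Int) ++ List.replicate (((n : Nat) : Int) - f).toNat 1 = indL n f := by
  refine List.ext_getElem (by simp [indL]; omega) ?_
  intro k h1 h2
  have hkn : k < n := by simpa [indL] using h2
  simp only [indL, List.getElem_map, List.getElem_range]
  by_cases hk : k < f.toNat
  · rw [List.getElem_append_left (by simpa using hk), List.getElem_replicate, if_neg (by omega)]
  · rw [List.getElem_append_right (by simp; omega), List.getElem_replicate, if_pos (by omega)]

-- B's C-level list construction for the start/end flags is the window indicator
theorem repl_indL2 (n : Nat) (s f : Int) (h0 : 0 ≤ s) (hs : s ≤ (n : Int)) (hf : f ≤ (n : Int)) :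
    List.replicate s.toNat (0 : Int) ++ List.replicate (max (f - s) 0).toNat 1 ++
      List.replicate (((n : Nat) : Int) - s - max (f - s) 0).toNat 0 = indL2 n s f := by
  rcases max_cases (f - s) (0 : Int) with ⟨hm, hm2⟩ | ⟨hm, hm2⟩ <;> rw [hm] <;>
  · refine List.ext_getElem (by simp [indL2]; omega) ?_
    intro k h1 h2
    have hkn : k < n := by simpa [indL2] using h2
    simp only [indL2, List.getElem_map, List.getElem_range]
    by_cases hks : k < s.toNat
    · rw [List.getElem_append_left (by simp; omega), List.getElem_append_left (by simpa using hks),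
        List.getElem_replicate, if_neg (by omega)]
    · by_cases hkw : k < s.toNat + ((f - s).toNat)
      · rw [List.getElem_append_left (by simp; omega), List.getElem_append_right (by simp; omega),
          List.getElem_replicate, if_pos (by omega)]
      · rw [List.getElem_append_right (by simp; omega), List.getElem_replicate, if_neg (by omega)]

theorem zero_final (n : Nat) (F m : Int) :
    (List.range n).map (fun (j : Nat) => if m ≤ (j : Int) ∧ ¬((F ≤ (j : Int)) ∧ (j : Int) < (n : Int)) then 1 else 0) = indL2 n m F := by
  simp only [indL2]
  apply List.map_congr_left
  intro j hj
  have hjn : j < n := by simpa using hj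
  by_cases h : m ≤ (j : Int) ∧ (j : Int) < F
  · rw [if_pos (by omega), if_pos h]
  · rw [if_neg (by omega), if_neg h]

theorem ports_eq (tsp sl : Int) (la : List (List (List Int))) (c : Int) :
    count_correctness tsp sl la c = count_correctness_alt tsp sl la c := by
  have hcast : (if c > 0 then c else 0) = ((c.toNat : Nat) : Int) := by split <;> omega
  simp only [count_correctness, count_correctness_alt, hcast, Int.toNat_natCast]
  rw [replicate_eq_indL, A_fold_enum tsp (tsp + sl - 1) c la,
    A_loop1 tsp (tsp + sl - 1) c la 0 _ _ _ le_rfl le_rfl le_rfl le_rfl,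
    B_loop tsp (tsp + sl - 1) (la.take c.toNat) 0, ← gmins_take]
  rw [length_indL, pair_fold_set, zero_aux c.toNat _ _ c.toNat le_rfl, zero_aux c.toNat _ _ c.toNat le_rfl,
    zero_final, zero_final]
  obtain ⟨hle1, hle2, hle3⟩ := gmins_le tsp (tsp + sl - 1) la 0 (((c.toNat : Nat) : Int), ((c.toNat : Nat) : Int), ((c.toNat : Nat) : Int))
  obtain ⟨hge1, hge2, hge3⟩ := gmins_nonneg tsp (tsp + sl - 1) la 0 (((c.toNat : Nat) : Int), ((c.toNat : Nat) : Int), ((c.toNat : Nat) : Int)) le_rfl (by positivity) (by positivity) (by positivity)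
  rw [repl_indL c.toNat _ hge1 hle1, repl_indL2 c.toNat _ _ hge2 hle2 hle1, repl_indL2 c.toNat _ _ hge3 hle3 hle1]

-- ===== VERDICT (by name: the statement is the Claim_ definition above) =====
theorem count_correctness_spec : Claim_equal_count_correctness := by
  intro tsp sl la c _ _
  unfold Spec_count_correctness
  exact ports_eq tsp sl la c

@[simp] theorem count_correctness_raises : Claim_raises_count_correctness := by
  unfold Claim_raises_count_correctness
  constructor
  · intro tsp sl la c _ hr hp
    obtain ⟨-, a, ha, hbad⟩ := hr
    exact hbad (hp a ha)
  · refine ⟨by decide, ⟨by decide, by decide⟩, by decide⟩
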